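-- pv_equiv track=rewrite | github.com/MrBrantCode/unitest_baseline | mut_generate/mist_train_cf/cf_55235/solution.py | f
-- ===== SOURCE A (Python) =====
-- def f(n):
--     result = [1] * n
--     even_val = 1
--     odd_val = 1
--     for i in range(2, n+1):
--         if i % 2 == 0:
--             even_val *= i
--             result[i-1] = even_val
--         else:
--             odd_val += i
--             result[i-1] = odd_val
--     return result
-- ===== SOURCE B (Python) =====
-- def _even_prod(k):
--     # product 2*4*...*(2k)
--     p = 1
--     for j in range(1, k + 1):
--         p *= 2 * j
--     return p
--
--
-- def f(n):
--     # Each element is computed independently from its 1-based index i: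
--     # odd i  -> 1 + 3 + ... + i = ((i + 1) // 2) ** 2  (closed form),
--     # even i -> 2 * 4 * ... * i = _even_prod(i // 2).
--     return [((i + 1) // 2) ** 2 if i % 2 != 0 else _even_prod(i // 2)
--             for i in range(1, n + 1)]
-- ===== Notes on version B (the rewrite author's own statement) =====
-- stated objective: alternative
-- what changed: Replaces A's stateful loop (running even-product and odd-sum accumulators written into a preallocated [1]*n list) by a stateless comprehension computing each element directly from its 1-based index: a closed-form square for odd indices and a per-index even product for even indices.
import Mathlib
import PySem

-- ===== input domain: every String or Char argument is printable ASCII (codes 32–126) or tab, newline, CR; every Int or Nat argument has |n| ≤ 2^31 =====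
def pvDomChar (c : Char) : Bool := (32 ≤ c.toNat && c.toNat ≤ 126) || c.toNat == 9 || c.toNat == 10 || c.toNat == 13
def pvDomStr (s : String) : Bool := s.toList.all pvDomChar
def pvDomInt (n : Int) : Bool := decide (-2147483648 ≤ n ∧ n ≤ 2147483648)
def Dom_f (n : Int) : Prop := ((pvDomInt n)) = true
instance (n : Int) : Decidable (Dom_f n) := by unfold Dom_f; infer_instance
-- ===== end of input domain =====

-- B replaces A's stateful loop (running accumulators written into [1]*n) by a stateless
-- per-index computation (closed-form square for odd indices, a per-index even product for
-- even indices); objective: alternative (no speed claim).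

-- ===== PORT A =====
def f (n : Int) : List Int :=
  ((PySem.List.pyRange 2 (n + 1) 1).foldl
    (fun (st : List Int × Int × Int) i =>
      if PySem.Int.mod i 2 == 0 then
        (PySem.List.pySetD st.1 (i - 1) (st.2.1 * i), st.2.1 * i, st.2.2)
      else
        (PySem.List.pySetD st.1 (i - 1) (st.2.2 + i), st.2.1, st.2.2 + i))
    (List.replicate n.toNat 1, 1, 1)).1

-- ===== PORT B =====
def evenProdB (k : Int) : Int :=
  (PySem.List.pyRange 1 (k + 1) 1).foldl (fun p j => p * (2 * j)) 1

def f_alt (n : Int) : List Int :=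
  (PySem.List.pyRange 1 (n + 1) 1).map
    (fun i =>
      if PySem.Int.mod i 2 != 0 then (PySem.Int.floordiv (i + 1) 2) ^ 2
      else evenProdB (PySem.Int.floordiv i 2))

-- ===== PRECONDITION & SPEC =====
def Spec_f (n : Int) (out : List Int) : Prop := out = f_alt n
instance (n : Int) (out : List Int) : Decidable (Spec_f n out) := by unfold Spec_f; infer_instance

-- ===== CLAIM (what is proved, stated in full; the proofs are below) =====
def Claim_equal_f : Prop := ∀ (n : Int), Dom_f n → Spec_f n (f n)

-- ===== LEMMAS AND PROOFS =====

-- running even product 2*4*...*j (for even j), E 0 = E 1 = 1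
def E : Nat → Int
  | 0 => 0 + 1
  | j + 1 => if (j + 1) % 2 = 0 then E j * ((j + 1 : Nat) : Int) else E j

-- running odd sum 1+3+...+j (for odd j), O 0 = 0
def O : Nat → Int
  | 0 => 0
  | j + 1 => if (j + 1) % 2 = 1 then O j + ((j + 1 : Nat) : Int) else O j

-- the value A leaves at 1-based position i
def v (i : Nat) : Int := if i % 2 = 0 then E i else O i

-- product 2*4*...*(2k) as a Nat recursion
def P : Nat → Int
  | 0 => 1
  | k + 1 => P k * (2 * ((k + 1 : Nat) : Int))

def pref (j n : Nat) : List Int :=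
  (List.range n).map (fun p => if p + 1 ≤ j then v (p + 1) else 1)

lemma E_succ (j : Nat) : E (j + 1) = if (j + 1) % 2 = 0 then E j * ((j + 1 : Nat) : Int) else E j := rfl

lemma O_succ (j : Nat) : O (j + 1) = if (j + 1) % 2 = 1 then O j + ((j + 1 : Nat) : Int) else O j := rfl

lemma evenProdB_natCast (k : Nat) : evenProdB ((k : Nat) : Int) = P k := by
  induction k with
  | zero => simp [evenProdB, P]
  | succ k ih =>
    have hsplit : PySem.List.pyRange 1 (((k + 1 : Nat) : Int) + 1) 1
        = PySem.List.pyRange 1 (((k : Nat) : Int) + 1) 1 ++ [((k : Nat) : Int) + 1] := by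
      push_cast
      rw [show ((k : Int) + 1 + 1) = ((1 : Int) + k) + 1 by ring,
          PySem.List.pyRange_one_succ_right (by omega)]
      congr 2 <;> ring
    simp only [evenProdB] at *
    rw [hsplit, List.foldl_append, ih]
    simp only [List.foldl, P]
    push_cast; ring

lemma O_odd (k : Nat) : O (2 * k + 1) = ((k : Int) + 1) ^ 2 := by
  induction k with
  | zero => simp [O]
  | succ k ih =>
    have h1 : 2 * (k + 1) + 1 = ((2 * k + 1) + 1) + 1 := by ring
    rw [h1, O_succ, if_pos (by omega), O_succ, if_neg (by omega), ih]
    push_cast; ring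

lemma E_even (k : Nat) : E (2 * k) = P k := by
  induction k with
  | zero => simp [E, P]
  | succ k ih =>
    have h1 : 2 * (k + 1) = ((2 * k) + 1) + 1 := by ring
    rw [h1, E_succ, if_pos (by omega), E_succ, if_neg (by omega), ih]
    simp only [P]
    push_cast; ring

-- B's per-index formula computes v
lemma g_eq_v (p : Nat) :
    (if PySem.Int.mod ((1 : Int) + (p : Nat)) 2 != 0
     then (PySem.Int.floordiv (((1 : Int) + (p : Nat)) + 1) 2) ^ 2
     else evenProdB (PySem.Int.floordiv ((1 : Int) + (p : Nat)) 2)) = v (p + 1) := by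
  have hcast : ((1 : Int) + (p : Nat)) = ((p + 1 : Nat) : Int) := by push_cast; ring
  have hmodc : PySem.Int.mod ((p + 1 : Nat) : Int) 2 = (((p + 1) % 2 : Nat) : Int) :=
    PySem.Int.mod_natCast _ _
  rcases Nat.even_or_odd (p + 1) with he | ho
  · obtain ⟨k, hk⟩ := he
    have hmod : (p + 1) % 2 = 0 := by omega
    have hcond : (PySem.Int.mod ((p + 1 : Nat) : Int) 2 != 0) = false := by
      rw [hmodc, hmod]; decide
    rw [hcast, hcond, if_neg (by simp)]
    have hfd : PySem.Int.floordiv ((p + 1 : Nat) : Int) 2 = (((p + 1) / 2 : Nat) : Int) :=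
      PySem.Int.floordiv_natCast _ _
    rw [hfd, show (p + 1) / 2 = k by omega, evenProdB_natCast, v, if_pos hmod,
        show p + 1 = 2 * k by omega, E_even]
  · obtain ⟨k, hk⟩ := ho
    have hmod : (p + 1) % 2 = 1 := by omega
    have hcond : (PySem.Int.mod ((p + 1 : Nat) : Int) 2 != 0) = true := by
      rw [hmodc, hmod]; decide
    rw [hcast, hcond, if_pos rfl]
    have hc2 : ((p + 1 : Nat) : Int) + 1 = ((p + 2 : Nat) : Int) := by push_cast; ring
    have hfd : PySem.Int.floordiv ((p + 2 : Nat) : Int) 2 = (((p + 2) / 2 : Nat) : Int) :=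
      PySem.Int.floordiv_natCast _ _
    rw [hc2, hfd, show (p + 2) / 2 = k + 1 by omega, v, if_neg (by omega),
        show p + 1 = 2 * k + 1 by omega, O_odd]
    push_cast; ring

lemma pref_set (j n : Nat) (hj : j < n) (val : Int) (hval : val = v (j + 1)) :
    (pref j n).set j val = pref (j + 1) n := by
  apply List.ext_getElem
  · simp [pref]
  · intro p hp1 hp2
    simp only [pref, List.length_map, List.length_range] at hp2
    simp only [List.getElem_set, pref, List.getElem_map, List.getElem_range]
    by_cases h : p = j
    · subst h; simp [hval]
    · rw [if_neg (by omega : ¬ j = p)]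
      by_cases h2 : p + 1 ≤ j
      · rw [if_pos h2, if_pos (by omega)]
      · rw [if_neg h2, if_neg (by omega)]

-- A's loop step at i = j+1 advances the invariant
lemma step_adv (j n : Nat) (hj : j < n) :
    (if (PySem.Int.mod (((j : Nat) : Int) + 1) 2 == 0) = true then
      (PySem.List.pySetD (pref j n) (((j : Nat) : Int) + 1 - 1) (E j * (((j : Nat) : Int) + 1)),
        E j * (((j : Nat) : Int) + 1), O j)
    else
      (PySem.List.pySetD (pref j n) (((j : Nat) : Int) + 1 - 1) (O j + (((j : Nat) : Int) + 1)),
        E j, O j + (((j : Nat) : Int) + 1)))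
    = (pref (j + 1) n, E (j + 1), O (j + 1)) := by
  have hcast : ((j : Nat) : Int) + 1 = ((j + 1 : Nat) : Int) := by push_cast; ring
  have hidx : ((j + 1 : Nat) : Int) - 1 = ((j : Nat) : Int) := by push_cast; ring
  have hmodc : PySem.Int.mod ((j + 1 : Nat) : Int) 2 = (((j + 1) % 2 : Nat) : Int) :=
    PySem.Int.mod_natCast _ _
  rw [hcast, hidx]
  rcases Nat.even_or_odd (j + 1) with he | ho
  · have hm : (j + 1) % 2 = 0 := Nat.even_iff.mp he
    have hcond : (PySem.Int.mod ((j + 1 : Nat) : Int) 2 == 0) = true := by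
      rw [hmodc, hm]; decide
    rw [hcond, if_pos rfl, PySem.List.pySetD_natCast]
    refine congrArg₂ Prod.mk ?_ (congrArg₂ Prod.mk ?_ ?_)
    · exact pref_set j n hj _ (by rw [v, if_pos hm, E_succ, if_pos hm])
    · rw [E_succ, if_pos hm]
    · rw [O_succ, if_neg (by omega)]
  · have hm : (j + 1) % 2 = 1 := Nat.odd_iff.mp ho
    have hcond : (PySem.Int.mod ((j + 1 : Nat) : Int) 2 == 0) = false := by
      rw [hmodc, hm]; decide
    rw [hcond, if_neg (by simp), PySem.List.pySetD_natCast]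
    refine congrArg₂ Prod.mk ?_ (congrArg₂ Prod.mk ?_ ?_)
    · exact pref_set j n hj _ (by rw [v, if_neg (by omega), O_succ, if_pos hm])
    · rw [E_succ, if_neg (by omega)]
    · rw [O_succ, if_pos hm]

-- A's loop from i = j+1 completes the prefix
lemma loopA (m : Nat) : ∀ (j n : Nat), j + m = n →
    ((PySem.List.pyRange (((j : Nat) : Int) + 1) (((n : Nat) : Int) + 1) 1).foldl
      (fun (st : List Int × Int × Int) i =>
        if PySem.Int.mod i 2 == 0 then
          (PySem.List.pySetD st.1 (i - 1) (st.2.1 * i), st.2.1 * i, st.2.2)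
        else
          (PySem.List.pySetD st.1 (i - 1) (st.2.2 + i), st.2.1, st.2.2 + i))
      (pref j n, E j, O j))
    = (pref n n, E n, O n) := by
  induction m with
  | zero =>
    intro j n h2
    have : j = n := by omega
    subst this
    rw [PySem.List.pyRange_one_eq_nil (by omega)]
    rfl
  | succ m ih =>
    intro j n h2
    rw [PySem.List.pyRange_one_cons (by omega)]
    simp only [List.foldl_cons]
    rw [step_adv j n (by omega)]
    have hc2 : ((j : Nat) : Int) + 1 + 1 = ((j + 1 : Nat) : Int) + 1 := by push_cast; ring
    rw [hc2]
    exact ih (j + 1) n (by omega)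

lemma pref_one (n : Nat) : List.replicate n (1 : Int) = pref 1 n := by
  apply List.ext_getElem
  · simp [pref]
  · intro p hp1 hp2
    simp only [pref, List.getElem_replicate, List.getElem_map, List.getElem_range]
    by_cases h : p + 1 ≤ 1
    · have : p = 0 := by omega
      subst this
      simp [v, O]
    · rw [if_neg h]

lemma pref_full (n : Nat) : pref n n = (List.range n).map (fun p => v (p + 1)) := by
  simp only [pref]
  apply List.map_congr_left
  intro p hp
  rw [if_pos (by simp at hp; omega)]

lemma f_alt_natCast (n : Nat) :
    f_alt ((n : Nat) : Int) = (List.range n).map (fun p => v (p + 1)) := by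
  simp only [f_alt]
  rw [PySem.List.pyRange_one]
  have : (((n : Nat) : Int) + 1 - 1).toNat = n := by omega
  rw [this, List.map_map]
  apply List.map_congr_left
  intro p _
  exact g_eq_v p

-- ===== VERDICT (by name: the statement is the Claim_ definition above) =====
theorem f_spec : Claim_equal_f := by
  intro n _
  unfold Spec_f
  by_cases hn : n ≤ 0
  · unfold f f_alt
    rw [PySem.List.pyRange_one_eq_nil (by omega), PySem.List.pyRange_one_eq_nil (by omega)]
    simp [Int.toNat_of_nonpos hn]
  · have hn' : 0 < n := lt_of_not_ge hn
    obtain ⟨N, rfl⟩ : ∃ N : Nat, n = (N : Int) := ⟨n.toNat, (Int.toNat_of_nonneg (by omega)).symm⟩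
    have hN : 1 ≤ N := by exact_mod_cast hn'
    have key := loopA (N - 1) 1 N (by omega)
    rw [show ((1 : Nat) : Int) + 1 = 2 by norm_num,
        show E 1 = 1 from rfl, show O 1 = 1 from rfl] at key
    unfold f
    rw [show ((N : Int)).toNat = N by omega, pref_one, key]
    simp only
    rw [pref_full, f_alt_natCast]
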